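-- pv_equiv track=rewrite | github.com/gheun0712/AL_TIL | 프로그래머스/lv3/12987. 숫자 게임/숫자 게임.py | solution
-- ===== SOURCE A (Python) =====
-- def solution(A, B):
--     answer = 0
--
--     A.sort()
--     B.sort()
--
--     a = b = 0
--
--     while a != len(A) and b != len(B):
--         if B[b] > A[a]:
--             answer += 1
--             a += 1
--             b += 1
--         else:
--             b += 1
--
--     return answer
-- ===== SOURCE B (Python) =====
-- def solution(A, B):
--     # Hall-deficiency counting (no matching simulation): by Hall's theorem the
--     # maximum number of wins is len(B) minus the largest deficiency
--     # max(0, #{b in B : b <= v} - #{a in A : a < v}) over thresholds v in B.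
--     # Both lists are sorted in place (same argument mutation as the original).
--     A.sort()
--     B.sort()
--     j = 0            # j = #{a in A : a < v} for the current threshold v
--     deficiency = 0
--     for i, v in enumerate(B):
--         while j < len(A) and A[j] < v:
--             j += 1
--         if (i + 1) - j > deficiency:
--             deficiency = (i + 1) - j
--     return len(B) - deficiency
-- ===== Notes on version B (the rewrite author's own statement) =====
-- stated objective: alternative
-- what changed: Replaces the greedy matching simulation (two indices walking both sorted lists, pairing a win per step) by a Hall-deficiency computation: one merge-style counting scan finds max(0, max_v (#{b in B : b <= v} - #{a in A : a < v})) and the answer is len(B) minus that maximum; no pairing or win counter exists in B.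
import Mathlib
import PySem

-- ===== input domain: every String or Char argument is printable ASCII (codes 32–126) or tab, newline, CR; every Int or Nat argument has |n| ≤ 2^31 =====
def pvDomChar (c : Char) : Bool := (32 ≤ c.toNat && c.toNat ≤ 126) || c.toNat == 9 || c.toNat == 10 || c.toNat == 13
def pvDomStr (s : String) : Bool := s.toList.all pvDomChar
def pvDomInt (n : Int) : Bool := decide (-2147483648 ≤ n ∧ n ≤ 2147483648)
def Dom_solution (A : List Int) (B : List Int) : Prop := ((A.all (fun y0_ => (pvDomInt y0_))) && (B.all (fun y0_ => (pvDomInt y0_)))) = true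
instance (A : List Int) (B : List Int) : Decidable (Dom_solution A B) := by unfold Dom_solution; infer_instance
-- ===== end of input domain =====

-- B is an 'alternative' algorithm: instead of A's greedy matching simulation it
-- computes the Hall deficiency max(0, max_v (#{b ∈ B : b ≤ v} − #{a ∈ A : a < v}))
-- by one counting scan over the sorted lists and returns len(B) minus it.
-- Both Pythons sort their arguments IN PLACE (same mutation); the equivalence
-- proved here is about the return value.

-- ===== PORT A =====
-- the while loop: a,b only move forward, so it is structural recursion on the
-- remaining suffixes; the loop stops when either runs out.
def pvLoopA : List Int → List Int → Int → Int
  | x :: xs, y :: ys, answer =>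
      if y > x then pvLoopA xs ys (answer + 1) else pvLoopA (x :: xs) ys answer
  | _, _, answer => answer

def solution (A : List Int) (B : List Int) : Int :=
  pvLoopA (PySem.List.sorted A (fun v => v) false) (PySem.List.sorted B (fun v => v) false) 0

-- ===== PORT B =====
-- Source B's inner `while j < len(A) and A[j] < v: j += 1`: the index j is carried
-- together with the remaining suffix A[j:] (first component), so the while is
-- structural recursion popping the suffix while its head is < v.
def pvAdvance : List Int → Int → Int → List Int × Int
  | a :: as_, j, v => if a < v then pvAdvance as_ (j + 1) v else (a :: as_, j)
  | [], j, _ => ([], j)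

-- one iteration of Source B's `for i, v in enumerate(B)`: state (A-suffix, j, i, deficiency)
def pvStepB (st : List Int × Int × Int × Int) (v : Int) : List Int × Int × Int × Int :=
  let adv := pvAdvance st.1 st.2.1 v
  let i := st.2.2.1
  let d := st.2.2.2
  (adv.1, adv.2, i + 1, if (i + 1) - adv.2 > d then (i + 1) - adv.2 else d)

def solution_alt (A : List Int) (B : List Int) : Int :=
  ((PySem.List.sorted B (fun v => v) false).length : Int) -
    (List.foldl pvStepB (PySem.List.sorted A (fun v => v) false, 0, 0, 0)
      (PySem.List.sorted B (fun v => v) false)).2.2.2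

-- ===== PRECONDITION & SPEC =====
def Spec_solution (A : List Int) (B : List Int) (out : Int) : Prop := out = solution_alt A B
instance (A : List Int) (B : List Int) (out : Int) : Decidable (Spec_solution A B out) := by unfold Spec_solution; infer_instance

-- ===== CLAIM (what is proved, stated in full; the proofs are below) =====
def Claim_equal_solution : Prop := ∀ (A : List Int) (B : List Int), Dom_solution A B → Spec_solution A B (solution A B)

-- ===== LEMMAS AND PROOFS =====

-- #{a ∈ S : a < v} as an Int
def pvCnt (S : List Int) (v : Int) : Int := (S.countP (fun a => a < v) : Int)

-- the deficiency-term list: (pvT S Y)[i] = (i+1) - #{a ∈ S : a < Y[i]}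
def pvT : List Int → List Int → List Int
  | _, [] => []
  | S, y :: Y => (1 - pvCnt S y) :: (pvT S Y).map (fun t => t + 1)

theorem pvLoopA_acc (xs ys : List Int) (c : Int) : pvLoopA xs ys c = c + pvLoopA xs ys 0 := by
  induction xs generalizing ys c with
  | nil => simp [pvLoopA]
  | cons x xs ih =>
    induction ys generalizing c with
    | nil => simp [pvLoopA]
    | cons y ys ihy =>
      simp only [pvLoopA]
      by_cases h : y > x
      · simp only [h, if_pos]
        rw [ih ys (c + 1), ih ys (0 + 1)]; ring
      · simp only [h, if_neg, not_false_iff]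
        rw [ihy c, ihy 0]

theorem pvT_shift (c : Int) (S1 S2 Y : List Int)
    (h : ∀ y ∈ Y, pvCnt S1 y + c = pvCnt S2 y) :
    pvT S2 Y = (pvT S1 Y).map (fun t => t - c) := by
  induction Y with
  | nil => simp [pvT]
  | cons y Y ih =>
    have hy := h y (List.mem_cons_self)
    rw [pvT, pvT, ih (fun z hz => h z (List.mem_cons_of_mem _ hz)),
        List.map_cons, List.map_map, List.map_map]
    congr 1
    · omega
    · apply List.map_congr_left
      intro t _
      simp only [Function.comp]
      omega

theorem pv_foldl_max_map_add (l : List Int) (d c : Int) :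
    List.foldl max (d + c) (l.map (fun t => t + c)) = (List.foldl max d l) + c := by
  induction l generalizing d with
  | nil => simp
  | cons x l ih =>
    simp only [List.map_cons, List.foldl]
    have h : max (d + c) (x + c) = (max d x) + c := by omega
    rw [h, ih]

theorem pvCnt_takeWhile (S : List Int) (v : Int) (hS : S.Pairwise (· ≤ ·)) :
    pvCnt S v = ((S.takeWhile (fun a => a < v)).length : Int) := by
  induction S with
  | nil => simp [pvCnt]
  | cons a S ih =>
    rcases List.pairwise_cons.mp hS with ⟨hall, htail⟩
    by_cases h : a < v
    · rw [pvCnt, List.countP_cons_of_pos (by simpa using h),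
          List.takeWhile_cons_of_pos (by simpa using h)]
      have := ih htail
      rw [pvCnt] at this
      simp only [List.length_cons]
      push_cast at this ⊢
      omega
    · rw [pvCnt, List.countP_cons_of_neg (by simpa using h),
          List.takeWhile_cons_of_neg (by simpa using h)]
      have hz : S.countP (fun a => decide (a < v)) = 0 := by
        rw [List.countP_eq_zero]
        intro b hb
        have := hall b hb
        simp only [decide_eq_true_eq]
        omega
      simp [hz]

theorem pvAdvance_eq (S : List Int) (j v : Int) :
    pvAdvance S j v = (S.dropWhile (fun a => a < v),
                       j + ((S.takeWhile (fun a => a < v)).length : Int)) := by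
  induction S generalizing j with
  | nil => simp [pvAdvance]
  | cons a S ih =>
    by_cases h : a < v
    · rw [pvAdvance, if_pos h, ih,
          List.dropWhile_cons_of_pos (by simpa using h),
          List.takeWhile_cons_of_pos (by simpa using h)]
      simp only [Prod.mk.injEq, List.length_cons, true_and]
      push_cast
      ring
    · rw [pvAdvance, if_neg h,
          List.dropWhile_cons_of_neg (by simpa using h),
          List.takeWhile_cons_of_neg (by simpa using h)]
      simp

theorem pvCnt_split (S : List Int) (v y : Int) (hS : S.Pairwise (· ≤ ·)) (hvy : v ≤ y) :
    pvCnt S y = pvCnt S v + pvCnt (S.dropWhile (fun a => a < v)) y := by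
  have h1 : (S.takeWhile (fun a => decide (a < v))).countP (fun a => decide (a < y))
      = (S.takeWhile (fun a => decide (a < v))).length := by
    rw [List.countP_eq_length]
    intro b hb
    have := List.mem_takeWhile_imp hb
    simp only [decide_eq_true_eq] at this ⊢
    omega
  have hsplit : pvCnt S y
      = ((S.takeWhile (fun a => decide (a < v))).countP (fun a => decide (a < y)) : Int)
        + ((S.dropWhile (fun a => decide (a < v))).countP (fun a => decide (a < y)) : Int) := by
    conv_lhs => rw [pvCnt, ← List.takeWhile_append_dropWhile (p := fun a => decide (a < v)) (l := S)]
    rw [List.countP_append]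
    push_cast
    ring
  rw [hsplit, h1, ← pvCnt_takeWhile S v hS]
  rfl

-- P1: A's greedy loop on sorted inputs equals |Y| minus the maximal deficiency.
theorem pvLoopA_eq_def : ∀ Y : List Int, Y.Pairwise (· ≤ ·) →
    ∀ X : List Int, X.Pairwise (· ≤ ·) →
    pvLoopA X Y 0 = (Y.length : Int) - List.foldl max 0 (pvT X Y) := by
  intro Y
  induction Y with
  | nil => intro _ X _; cases X <;> simp [pvLoopA, pvT]
  | cons y Y ihY =>
    intro hY X hX
    rcases List.pairwise_cons.mp hY with ⟨hYall, hYtail⟩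
    cases X with
    | nil =>
      have h0 : pvCnt ([] : List Int) y = 0 := by simp [pvCnt]
      have hL : pvLoopA [] (y :: Y) 0 = 0 := by simp [pvLoopA]
      have hL' : pvLoopA [] Y 0 = 0 := by cases Y <;> simp [pvLoopA]
      have ih := ihY hYtail [] List.Pairwise.nil
      rw [hL'] at ih
      rw [hL]
      simp only [pvT, h0, sub_zero]
      rw [show List.foldl max 0 ((1:Int) :: (pvT [] Y).map (fun t => t + 1))
            = List.foldl max (max 0 1) ((pvT [] Y).map (fun t => t + 1)) from rfl,
          show max (0:Int) 1 = 0 + 1 by omega,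
          pv_foldl_max_map_add]
      simp only [List.length_cons]
      push_cast
      omega
    | cons x X' =>
      rcases List.pairwise_cons.mp hX with ⟨hXall, hXtail⟩
      by_cases hxy : y > x
      · -- win case: heads matched
        simp only [pvLoopA, if_pos hxy]
        rw [pvLoopA_acc]
        have ih := ihY hYtail X' hXtail
        have hshift : pvT (x :: X') Y = (pvT X' Y).map (fun t => t - 1) := by
          apply pvT_shift
          intro z hz
          have hxz : x < z := lt_of_lt_of_le hxy (hYall z hz)
          rw [pvCnt, pvCnt, List.countP_cons_of_pos (by simpa using hxz)]
          push_cast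
          ring
        have hcnt1 : (1 : Int) ≤ pvCnt (x :: X') y := by
          rw [pvCnt, List.countP_cons_of_pos (by simpa using hxy)]
          push_cast
          omega
        simp only [pvT]
        rw [hshift, List.map_map]
        have hmapid : (pvT X' Y).map ((fun t => t + 1) ∘ (fun t => t - 1)) = pvT X' Y := by
          conv_rhs => rw [← List.map_id (pvT X' Y)]
          apply List.map_congr_left
          intro t _
          simp only [Function.comp, id]
          omega
        rw [hmapid,
            show List.foldl max 0 ((1 - pvCnt (x :: X') y) :: pvT X' Y)
              = List.foldl max (max 0 (1 - pvCnt (x :: X') y)) (pvT X' Y) from rfl,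
            max_eq_left (by omega : (1:Int) - pvCnt (x :: X') y ≤ 0),
            ih]
        simp only [List.length_cons]
        push_cast
        ring
      · -- skip case: the current B card beats nothing that is left
        simp only [pvLoopA, if_neg hxy]
        have ih := ihY hYtail (x :: X') hX
        have h0 : pvCnt (x :: X') y = 0 := by
          rw [pvCnt, List.countP_eq_zero.mpr]
          · rfl
          · intro b hb
            simp only [List.mem_cons] at hb
            simp only [decide_eq_true_eq]
            rcases hb with rfl | hb
            · omega
            · have := hXall b hb
              omega
        rw [ih]
        simp only [pvT, h0, sub_zero]
        rw [show List.foldl max 0 ((1:Int) :: (pvT (x :: X') Y).map (fun t => t + 1))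
              = List.foldl max (max 0 1) ((pvT (x :: X') Y).map (fun t => t + 1)) from rfl,
            show max (0:Int) 1 = 0 + 1 by omega,
            pv_foldl_max_map_add]
        simp only [List.length_cons]
        push_cast
        ring

-- P2: B's counting fold computes the running maximum of the shifted term list.
theorem pvFoldB_def : ∀ Y : List Int, Y.Pairwise (· ≤ ·) →
    ∀ S : List Int, S.Pairwise (· ≤ ·) → ∀ j i d : Int,
    (List.foldl pvStepB (S, j, i, d) Y).2.2.2
      = List.foldl max d ((pvT S Y).map (fun t => t + (i - j))) := by
  intro Y
  induction Y with
  | nil => intro _ S _ j i d; simp [pvT]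
  | cons v Y ih =>
    intro hY S hS j i d
    rcases List.pairwise_cons.mp hY with ⟨hYall, hYtail⟩
    have hifmax : ∀ a b : Int, (if a > b then a else b) = max b a := by
      intro a b
      by_cases h : a > b
      · rw [if_pos h, max_eq_right h.le]
      · rw [if_neg h, max_eq_left (by omega)]
    have hstep : pvStepB (S, j, i, d) v
        = (S.dropWhile (fun a => a < v), j + pvCnt S v, i + 1,
           max d ((i + 1) - (j + pvCnt S v))) := by
      simp only [pvStepB, pvAdvance_eq S j v, ← pvCnt_takeWhile S v hS, hifmax]
    have hS' : (S.dropWhile (fun a => a < v)).Pairwise (· ≤ ·) :=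
      List.Pairwise.sublist (List.dropWhile_sublist _) hS
    have hsh : pvT S Y = (pvT (S.dropWhile (fun a => a < v)) Y).map
        (fun t => t - pvCnt S v) := by
      apply pvT_shift
      intro z hz
      have := pvCnt_split S v z hS (hYall z hz)
      omega
    rw [List.foldl_cons, hstep, ih hYtail _ hS' (j + pvCnt S v) (i + 1) _,
        pvT, List.map_cons, hsh, List.map_map, List.map_map, List.foldl_cons]
    congr 1
    · congr 1
      omega
    · apply List.map_congr_left
      intro t _
      simp only [Function.comp]
      omega

-- ===== VERDICT (by name: the statement is the Claim_ definition above) =====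
theorem solution_spec : Claim_equal_solution := by
  intro A B _
  unfold Spec_solution solution solution_alt
  rw [pvLoopA_eq_def _ (PySem.List.sorted_pairwise B (fun v => v)) _
        (PySem.List.sorted_pairwise A (fun v => v)),
      pvFoldB_def _ (PySem.List.sorted_pairwise B (fun v => v)) _
        (PySem.List.sorted_pairwise A (fun v => v)) 0 0 0]
  simp
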